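-- pv_equiv track=rewrite | github.com/ali-rose/Bachelor_project | Graduation_thesis_1/restruct.py | _filter_overlapping_entities
-- ===== SOURCE A (Python) =====
-- from typing import List, Dict, Tuple, Set, Optional,Any
--
-- def _filter_overlapping_entities(entities: Set[str]) -> Set[str]:
--     """过滤重复和重叠的实体"""
--     result = set()
--     entity_list = sorted(list(entities), key=len, reverse=True)
--
--     for i, entity in enumerate(entity_list):
--         should_add = True
--         for j, other_entity in enumerate(entity_list):
--             if i != j and entity in other_entity and len(entity) < len(other_entity):
--                 should_add = False
--                 break
--         if should_add:
--             result.add(entity)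
--
--     return result
-- ===== SOURCE B (Python) =====
-- def _filter_overlapping_entities(entities):
--     kept = []
--     for e in sorted(entities, key=len, reverse=True):
--         if not any(len(e) < len(k) and e in k for k in kept):
--             kept.append(e)
--     return set(kept)
-- ===== Notes on version B (the rewrite author's own statement) =====
-- stated objective: faster
-- what changed: B checks each entity only against the list of already-kept longer survivors (correct by transitivity of the substring relation on the length-descending order) instead of A's inner scan over the whole entity list for every entity.
import Mathlib
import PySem

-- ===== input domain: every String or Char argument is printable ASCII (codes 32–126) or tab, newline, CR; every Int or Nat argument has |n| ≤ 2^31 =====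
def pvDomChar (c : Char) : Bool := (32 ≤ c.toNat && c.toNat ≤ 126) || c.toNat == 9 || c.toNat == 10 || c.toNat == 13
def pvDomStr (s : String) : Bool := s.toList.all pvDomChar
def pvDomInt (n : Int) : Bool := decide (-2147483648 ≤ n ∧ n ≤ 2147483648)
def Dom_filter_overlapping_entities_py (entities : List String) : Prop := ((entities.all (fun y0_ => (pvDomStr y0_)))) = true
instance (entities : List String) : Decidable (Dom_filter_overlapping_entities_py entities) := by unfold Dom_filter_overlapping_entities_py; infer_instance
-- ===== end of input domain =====

-- B tests each entity only against the already-kept survivors instead of A's inner scan over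
-- the whole list (correct by transitivity of the substring relation on the length-descending order).

-- ===== PORT A =====
def filter_overlapping_entities_py (entities : List String) : List String :=
  let entity_list := PySem.List.sorted entities (fun s => PySem.Str.len s) true
  (PySem.List.enumerate entity_list 0).foldl
    (fun (result : PySem.Set String) ie =>
      -- inner 'for j, other_entity' loop that sets should_add := False and breaks ≡ any
      let should_add := !((PySem.List.enumerate entity_list 0).any fun jo =>
        ie.1 != jo.1 && PySem.Str.isIn ie.2 jo.2 &&
          decide (PySem.Str.len ie.2 < PySem.Str.len jo.2))
      if should_add then PySem.Set.add result ie.2 else result)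
    PySem.Set.empty

-- ===== PORT B =====
def filter_overlapping_entities_py_alt (entities : List String) : List String :=
  let kept := (PySem.List.sorted entities (fun s => PySem.Str.len s) true).foldl
    (fun (kept : List String) e =>
      if !(kept.any fun k =>
            decide (PySem.Str.len e < PySem.Str.len k) && PySem.Str.isIn e k)
      then kept ++ [e] else kept) []
  PySem.Set.ofList kept

-- ===== PRECONDITION & SPEC =====
def Spec_filter_overlapping_entities_py (entities : List String) (out : List String) : Prop := out = filter_overlapping_entities_py_alt entities
instance (entities : List String) (out : List String) : Decidable (Spec_filter_overlapping_entities_py entities out) := by unfold Spec_filter_overlapping_entities_py; infer_instance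

-- ===== CLAIM (what is proved, stated in full; the proofs are below) =====
def Claim_equal_filter_overlapping_entities_py : Prop := ∀ (entities : List String), Dom_filter_overlapping_entities_py entities → Spec_filter_overlapping_entities_py entities (filter_overlapping_entities_py entities)

-- ===== LEMMAS AND PROOFS =====

-- 'e has a strictly longer superstring in el'
def pvBadB (el : List String) (e : String) : Bool :=
  el.any fun o => decide (PySem.Str.len e < PySem.Str.len o) && PySem.Str.isIn e o

theorem pvBadB_iff (el : List String) (e : String) :
    pvBadB el e = true ↔ ∃ o ∈ el, PySem.Str.len e < PySem.Str.len o ∧ e.toList <:+: o.toList := by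
  simp only [pvBadB, List.any_eq_true, Bool.and_eq_true, decide_eq_true_eq,
    PySem.Str.isIn_iff_infix]

-- pick an element of maximal length from a nonempty list
theorem pv_exists_max (l : List String) (h : l ≠ []) :
    ∃ a ∈ l, ∀ b ∈ l, PySem.Str.len b ≤ PySem.Str.len a := by
  cases hm : l.argmax (fun s => PySem.Str.len s) with
  | none => exact absurd (List.argmax_eq_none.1 hm) h
  | some m => exact ⟨m, List.argmax_mem hm, fun b hb => List.le_of_mem_argmax hb hm⟩

-- A's inner any over enumerate ≡ pvBadB for an element of the list
theorem pv_inner_any (el : List String) (i : Int) (e : String)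
    (he : (i, e) ∈ PySem.List.enumerate el 0) :
    ((PySem.List.enumerate el 0).any fun jo =>
        i != jo.1 && PySem.Str.isIn e jo.2 &&
          decide (PySem.Str.len e < PySem.Str.len jo.2))
      = pvBadB el e := by
  rcases ((PySem.List.mem_enumerate_iff _ _ _).1 he) with ⟨ki, hki, hpe⟩
  have hie : i = (ki : Int) ∧ e = el[ki] := by
    constructor
    · have := congrArg Prod.fst hpe; simpa using this
    · have := congrArg Prod.snd hpe; simpa using this
  apply Bool.eq_iff_iff.2
  rw [pvBadB_iff]
  simp only [List.any_eq_true, Bool.and_eq_true, bne_iff_ne, decide_eq_true_eq,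
    PySem.Str.isIn_iff_infix]
  constructor
  · rintro ⟨jo, hmem, ⟨hne, hin⟩, hlt⟩
    rcases ((PySem.List.mem_enumerate_iff _ _ _).1 hmem) with ⟨k, hk, hpo⟩
    have ho : jo.2 = el[k] := by have := congrArg Prod.snd hpo; simpa using this
    exact ⟨jo.2, ho ▸ List.getElem_mem hk, hlt, hin⟩
  · rintro ⟨o, ho, hlt, hin⟩
    rcases List.getElem_of_mem ho with ⟨k, hk, hko⟩
    refine ⟨((k : Int), o), ?_, ⟨?_, hin⟩, hlt⟩
    · exact (PySem.List.mem_enumerate_iff _ _ _).2 ⟨k, hk, by simp [hko]⟩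
    · intro hik
      have : e = o := by
        rw [hie.2, ← hko]
        congr 1
        have : (ki : Int) = (k : Int) := hie.1 ▸ hik
        exact_mod_cast this
      rw [this] at hlt; omega

-- the survivors-so-far suffice to decide pvBadB, on a length-descending list
theorem pv_kept_test (el pre suf : List String) (e : String)
    (hel : el = pre ++ e :: suf)
    (hs : el.Pairwise (fun a b => PySem.Str.len b ≤ PySem.Str.len a)) :
    ((pre.filter fun x => !pvBadB el x).any fun k =>
        decide (PySem.Str.len e < PySem.Str.len k) && PySem.Str.isIn e k)
      = pvBadB el e := by
  apply Bool.eq_iff_iff.2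
  rw [pvBadB_iff]
  simp only [List.any_eq_true, Bool.and_eq_true, decide_eq_true_eq,
    PySem.Str.isIn_iff_infix, List.mem_filter, Bool.not_eq_eq_eq_not, Bool.not_true]
  constructor
  · rintro ⟨k, ⟨hk, _⟩, hlt, hin⟩
    exact ⟨k, by rw [hel]; exact List.mem_append_left _ hk, hlt, hin⟩
  · rintro ⟨o0, ho0, hlt0, hin0⟩
    -- the list of witnesses is nonempty; pick one of maximal length
    set W := el.filter (fun o => decide (PySem.Str.len e < PySem.Str.len o) && PySem.Str.isIn e o) with hWdef
    have hW : W ≠ [] := by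
      intro hnil
      have hmem : o0 ∈ W := List.mem_filter.2 ⟨ho0, by
        simp only [Bool.and_eq_true, decide_eq_true_eq]
        exact ⟨hlt0, (PySem.Str.isIn_iff_infix _ _).2 hin0⟩⟩
      rw [hnil] at hmem; simp at hmem
    rcases pv_exists_max W hW with ⟨o, hoW, hmax⟩
    have hoW' := List.mem_filter.1 hoW
    have hoel : o ∈ el := hoW'.1
    have hcond := hoW'.2
    simp only [Bool.and_eq_true, decide_eq_true_eq, PySem.Str.isIn_iff_infix] at hcond
    obtain ⟨hlt, hin⟩ := hcond
    -- o itself survives: a strictly longer superstring of o would be a longer witness for e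
    have hgood : pvBadB el o = false := by
      rw [Bool.eq_false_iff]
      intro hbadO
      rcases (pvBadB_iff el o).1 hbadO with ⟨o', ho', hlt', hin'⟩
      have hmemW : o' ∈ W := List.mem_filter.2 ⟨ho', by
        simp only [Bool.and_eq_true, decide_eq_true_eq]
        exact ⟨by omega, (PySem.Str.isIn_iff_infix _ _).2 (hin.trans hin')⟩⟩
      have := hmax o' hmemW
      omega
    -- o is strictly longer than e, so it lies in the processed prefix
    have hopre : o ∈ pre := by
      rw [hel] at hoel
      rcases List.mem_append.1 hoel with h | h
      · exact h
      · exfalso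
        rw [hel] at hs
        have hs2 := (List.pairwise_append.1 hs).2.1
        rcases List.mem_cons.1 h with h | h
        · rw [h] at hlt; omega
        · have := (List.pairwise_cons.1 hs2).1 o h
          omega
    exact ⟨o, ⟨hopre, hgood⟩, hlt, hin⟩

-- B's fold builds exactly the surviving elements of the sorted list, in order
theorem pv_kept_eq (el : List String)
    (hs : el.Pairwise (fun a b => PySem.Str.len b ≤ PySem.Str.len a)) :
    ∀ suf pre, el = pre ++ suf →
    suf.foldl
      (fun (kept : List String) e =>
        if !(kept.any fun k =>
              decide (PySem.Str.len e < PySem.Str.len k) && PySem.Str.isIn e k)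
        then kept ++ [e] else kept)
      (pre.filter fun x => !pvBadB el x)
      = el.filter fun x => !pvBadB el x := by
  intro suf
  induction suf with
  | nil => intro pre h; simp [h]
  | cons e suf' ih =>
    intro pre h
    simp only [List.foldl_cons]
    rw [pv_kept_test el pre suf' e h hs]
    have hstep : (if !pvBadB el e
        then (pre.filter fun x => !pvBadB el x) ++ [e]
        else (pre.filter fun x => !pvBadB el x))
        = (pre ++ [e]).filter fun x => !pvBadB el x := by
      cases hb : pvBadB el e <;> simp [List.filter_append, hb]
    rw [hstep, ih (pre ++ [e]) (by simp [h])]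

-- a fold over enumerate that ignores the index is a fold over the list
theorem pv_foldl_enum_snd {β : Type} (xs : List String) (s : Int) (g : β → String → β) (init : β) :
    (PySem.List.enumerate xs s).foldl (fun acc ie => g acc ie.2) init = xs.foldl g init := by
  induction xs generalizing s init with
  | nil => simp [PySem.List.enumerate_nil]
  | cons x t ih => simp [PySem.List.enumerate_cons, ih]

-- the two folds over the sorted, length-descending list agree
theorem pv_main (el : List String)
    (hs : el.Pairwise (fun a b => PySem.Str.len b ≤ PySem.Str.len a)) :
    (PySem.List.enumerate el 0).foldl
      (fun (result : PySem.Set String) ie =>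
        let should_add := !((PySem.List.enumerate el 0).any fun jo =>
          ie.1 != jo.1 && PySem.Str.isIn ie.2 jo.2 &&
            decide (PySem.Str.len ie.2 < PySem.Str.len jo.2))
        if should_add then PySem.Set.add result ie.2 else result)
      PySem.Set.empty
    = PySem.Set.ofList (el.foldl
        (fun (kept : List String) e =>
          if !(kept.any fun k =>
                decide (PySem.Str.len e < PySem.Str.len k) && PySem.Str.isIn e k)
          then kept ++ [e] else kept) []) := by
  -- A: rewrite the inner any via pv_inner_any, drop the indices, turn the conditional fold into a filter
  have hcong : ∀ (acc : PySem.Set String) (ie : Int × String), ie ∈ PySem.List.enumerate el 0 →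
      (let should_add := !((PySem.List.enumerate el 0).any fun jo =>
          ie.1 != jo.1 && PySem.Str.isIn ie.2 jo.2 &&
            decide (PySem.Str.len ie.2 < PySem.Str.len jo.2))
       if should_add then PySem.Set.add acc ie.2 else acc)
      = if !pvBadB el ie.2 then PySem.Set.add acc ie.2 else acc := by
    intro acc ie hie
    simp only
    rw [pv_inner_any el ie.1 ie.2 (by simpa using hie)]
  rw [PySem.List.foldl_congr_mem _ _ _ _ hcong]
  rw [pv_foldl_enum_snd el 0 (fun acc e => if !pvBadB el e then PySem.Set.add acc e else acc) PySem.Set.empty]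
  rw [PySem.List.foldl_if_eq_foldl_filter]
  rw [PySem.Set.ofList_eq_foldl]
  -- B: its fold over el is the same filter
  have hB := pv_kept_eq el hs el [] rfl
  simp only [List.filter_nil] at hB
  rw [hB]
  rfl

-- ===== VERDICT (by name: the statement is the Claim_ definition above) =====
theorem filter_overlapping_entities_py_spec : Claim_equal_filter_overlapping_entities_py := by
  intro entities _
  unfold Spec_filter_overlapping_entities_py
  unfold filter_overlapping_entities_py filter_overlapping_entities_py_alt
  exact pv_main (PySem.List.sorted entities (fun s => PySem.Str.len s) true)
    (PySem.List.sorted_pairwise_rev entities (fun s => PySem.Str.len s))
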